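-- pv_equiv track=rewrite | github.com/cdt2132/tcp | Sender/checkAck.py | check
-- ===== SOURCE A (Python) =====
-- def check(packet, received_check):
--     sum = 0
--     i = 0
--     if len(packet) % 2 != 0:
--         packet += 'a'
--
--     while i < len(packet):
--         words = ord(packet[i]) + (ord(packet[i + 1]) << 8)
--         sum = sum + words
--         i += 2
--
--     sum = sum + (sum >> 16)
--     sum = ~sum & 0xffff
--
--
--     if sum == received_check:
--         return True
--     else:
--         return False
-- ===== SOURCE B (Python) =====
-- def check(packet, received_check):
--     if len(packet) % 2 != 0:
--         packet += 'a'
--     low = sum(map(ord, packet[0::2]))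
--     high = sum(map(ord, packet[1::2]))
--     total = low + (high << 8)
--     total += total >> 16
--     total = ~total & 0xffff
--     return total == received_check
-- ===== Notes on version B (the rewrite author's own statement) =====
-- stated objective: alternative
-- what changed: Replaces A's single interleaved while-loop that pairs bytes two at a time with two independent passes over the strided slices packet[0::2] and packet[1::2], combining them as low + (high << 8); the carry fold and comparison are unchanged.
import Mathlib
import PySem

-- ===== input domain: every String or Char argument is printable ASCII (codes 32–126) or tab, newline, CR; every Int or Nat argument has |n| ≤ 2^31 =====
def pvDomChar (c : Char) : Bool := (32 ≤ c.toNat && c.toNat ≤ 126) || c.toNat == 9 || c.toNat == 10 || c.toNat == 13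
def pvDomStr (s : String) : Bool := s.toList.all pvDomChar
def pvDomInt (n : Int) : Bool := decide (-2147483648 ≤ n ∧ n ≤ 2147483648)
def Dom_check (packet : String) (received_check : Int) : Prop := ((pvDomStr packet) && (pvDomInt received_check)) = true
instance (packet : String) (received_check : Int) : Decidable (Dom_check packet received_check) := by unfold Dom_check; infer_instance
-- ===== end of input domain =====

-- B replaces A's single interleaved pair-stepping loop by two independent passes over the
-- strided slices packet[0::2] and packet[1::2], combined as low + (high << 8);
-- return-value equivalence only (neither program observably mutates its arguments).

-- ===== PORT A =====
-- the while loop: i steps by 2, each step adds packet[i] + (packet[i+1] << 8)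
def checkLoop : List Char → Int → Int
  | c1 :: c2 :: rest, s => checkLoop rest (s + ((c1.toNat : Int) + ((c2.toNat : Int) <<< (8 : Nat))))
  | _, s => s

def check (packet : String) (received_check : Int) : Bool :=
  let l := packet.toList
  let l := if PySem.Int.mod (PySem.Str.len packet) 2 ≠ 0 then l ++ ['a'] else l
  let s := checkLoop l 0
  let s := s + (s >>> 16)
  let s := PySem.Int.band (Int.not s) 0xffff
  if s = received_check then true else false

-- ===== PORT B =====
-- sum(map(ord, ...)) over a strided slice
def ordSum (l : List Char) : Int := l.foldl (fun s c => s + (c.toNat : Int)) 0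

def check_alt (packet : String) (received_check : Int) : Bool :=
  let l := packet.toList
  let l := if PySem.Int.mod (PySem.Str.len packet) 2 ≠ 0 then l ++ ['a'] else l
  let low := ordSum ((PySem.List.slice? l (some 0) none 2).getD [])
  let high := ordSum ((PySem.List.slice? l (some 1) none 2).getD [])
  let t := low + (high <<< (8 : Nat))
  let t := t + (t >>> 16)
  let t := PySem.Int.band (Int.not t) 0xffff
  t == received_check

-- ===== PRECONDITION & SPEC =====
def Spec_check (packet : String) (received_check : Int) (out : Bool) : Prop := out = check_alt packet received_check
instance (packet : String) (received_check : Int) (out : Bool) : Decidable (Spec_check packet received_check out) := by unfold Spec_check; infer_instance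

-- ===== CLAIM (what is proved, stated in full; the proofs are below) =====
def Claim_equal_check : Prop := ∀ (packet : String) (received_check : Int), Dom_check packet received_check → Spec_check packet received_check (check packet received_check)

-- ===== LEMMAS AND PROOFS =====

-- the even- and odd-position sublists, as plain recursion (proof vocabulary only)
def evens {α : Type} : List α → List α
  | [] => []
  | [a] => [a]
  | a :: _ :: t => a :: evens t

def odds {α : Type} : List α → List α
  | [] => []
  | [_] => []
  | _ :: b :: t => b :: odds t

lemma filterMap_stride_even : ∀ (l : List Char),
    List.filterMap (fun k : Nat => l[2 * k]?) (List.range ((l.length + 1) / 2)) = evens l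
  | [] => by simp [evens]
  | [a] => by simp [evens, List.range_succ]
  | a :: b :: t => by
    have hm : (( a :: b :: t).length + 1) / 2 = (t.length + 1) / 2 + 1 := by
      simp [List.length]; omega
    rw [hm, List.range_succ_eq_map, List.filterMap_cons, List.filterMap_map]
    have h0 : (a :: b :: t)[2 * 0]? = some a := by simp
    rw [h0]
    have hstep : ((fun k : Nat => (a :: b :: t)[2 * k]?) ∘ Nat.succ)
        = fun k : Nat => t[2 * k]? := by
      funext k
      show (a :: b :: t)[2 * (k + 1)]? = t[2 * k]?
      have : 2 * (k + 1) = (2 * k) + 1 + 1 := by omega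
      rw [this]
      simp
    rw [hstep, filterMap_stride_even t]
    rfl

lemma filterMap_stride_odd : ∀ (l : List Char),
    List.filterMap (fun k : Nat => l[2 * k + 1]?) (List.range (l.length / 2)) = odds l
  | [] => by simp [odds]
  | [_] => by simp [odds]
  | a :: b :: t => by
    have hm : (a :: b :: t).length / 2 = t.length / 2 + 1 := by
      simp [List.length]; omega
    rw [hm, List.range_succ_eq_map, List.filterMap_cons, List.filterMap_map]
    have h0 : (a :: b :: t)[2 * 0 + 1]? = some b := by simp
    rw [h0]
    have hstep : ((fun k : Nat => (a :: b :: t)[2 * k + 1]?) ∘ Nat.succ)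
        = fun k : Nat => t[2 * k + 1]? := by
      funext k
      show (a :: b :: t)[2 * (k + 1) + 1]? = t[2 * k + 1]?
      have : 2 * (k + 1) + 1 = (2 * k + 1) + 1 + 1 := by omega
      rw [this]
      simp
    rw [hstep, filterMap_stride_odd t]
    rfl

lemma slice?_two_even (l : List Char) :
    PySem.List.slice? l (some 0) none 2 = some (evens l) := by
  rw [← filterMap_stride_even l]
  simp only [PySem.List.slice?, PySem.List.sliceIndices]
  norm_num
  have hcount : (if 0 < l.length then (((l.length : Int) + 2 - 1) / 2).toNat else 0)
      = (l.length + 1) / 2 := by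
    split_ifs with h <;> omega
  rw [hcount]
  apply List.filterMap_congr
  intro k _
  congr 1

lemma slice?_two_odd (l : List Char) :
    PySem.List.slice? l (some 1) none 2 = some (odds l) := by
  rw [← filterMap_stride_odd l]
  simp only [PySem.List.slice?, PySem.List.sliceIndices]
  norm_num
  rcases l with _ | ⟨a, t⟩
  · simp
  · have hstart : min (1 : Int) (((a :: t).length : Int)) = 1 := by
      have : 1 ≤ (a :: t).length := by simp
      omega
    rw [hstart]
    have hcount : (if 1 < (a :: t).length
        then ((((a :: t).length : Int) - 1 + 2 - 1) / 2).toNat else 0)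
        = (a :: t).length / 2 := by
      split_ifs with h <;> omega
    rw [hcount]
    apply List.filterMap_congr
    intro k _
    congr 1
    omega

lemma foldl_ordSum : ∀ (l : List Char) (s : Int),
    l.foldl (fun s c => s + (c.toNat : Int)) s = s + (l.map (fun c => (c.toNat : Int))).sum
  | [], s => by simp
  | c :: t, s => by
    simp only [List.foldl_cons, List.map_cons, List.sum_cons]
    rw [foldl_ordSum t (s + (c.toNat : Int))]
    ring

lemma ordSum_eq (l : List Char) : ordSum l = ((l.map (fun c => (c.toNat : Int))).sum) := by
  unfold ordSum
  rw [foldl_ordSum]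
  ring

lemma checkLoop_eq : ∀ (l : List Char), l.length % 2 = 0 → ∀ s : Int,
    checkLoop l s = s + ordSum (evens l) + (ordSum (odds l)) * 256
  | [], _, s => by simp [checkLoop, evens, odds, ordSum]
  | [c], h, s => by simp at h
  | c1 :: c2 :: rest, h, s => by
    have hr : rest.length % 2 = 0 := by simp [List.length] at h ⊢; omega
    rw [show checkLoop (c1 :: c2 :: rest) s
        = checkLoop rest (s + ((c1.toNat : Int) + ((c2.toNat : Int) <<< (8 : Nat)))) from rfl,
      checkLoop_eq rest hr]
    simp only [evens, odds]
    rw [ordSum_eq, ordSum_eq, ordSum_eq, ordSum_eq]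
    simp only [List.map_cons, List.sum_cons]
    rw [Int.shiftLeft_eq]
    ring

lemma mod_len_two (packet : String) : PySem.Int.mod (PySem.Str.len packet) 2
    = ((packet.toList.length % 2 : Nat) : Int) := by
  simp [PySem.Str.len, PySem.Int.mod, Int.fmod_eq_emod]

-- ===== VERDICT (by name: the statement is the Claim_ definition above) =====
theorem check_spec : Claim_equal_check := by
  intro packet rc _
  unfold Spec_check check check_alt
  by_cases h : PySem.Int.mod (PySem.Str.len packet) 2 ≠ 0
  · have h1 : packet.toList.length % 2 = 1 := by
      have := mod_len_two packet; rw [this] at h; omega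
    have heven : (packet.toList ++ ['a']).length % 2 = 0 := by
      simp only [List.length_append, List.length_cons, List.length_nil]; omega
    simp only [if_pos h]
    rw [checkLoop_eq (packet.toList ++ ['a']) heven 0,
      slice?_two_even, slice?_two_odd]
    simp only [Option.getD_some]
    rw [Int.shiftLeft_eq]
    norm_num [beq_eq_decide]
  · have heven : packet.toList.length % 2 = 0 := by
      have := mod_len_two packet; rw [this] at h; omega
    simp only [if_neg h]
    rw [checkLoop_eq packet.toList heven 0,
      slice?_two_even, slice?_two_odd]
    simp only [Option.getD_some]
    rw [Int.shiftLeft_eq]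
    norm_num [beq_eq_decide]
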